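-- pv_equiv track=rewrite | github.com/storrer/udd-programming-practice | udd_problem_list/wordplay/22_free_wheel_of_fortune_words.py | word_match_unique
-- ===== SOURCE A (Python) =====
-- def word_match_unique(word: str):
--     free_letters = 'RSTLNE'
--
--     seen_rstlne = set()
--     # Iterate over word letter by letter
--     for letter in word:
--         if letter not in free_letters:
--             return False
--         if letter in seen_rstlne:
--             return False
--         seen_rstlne.add(letter)
--
--     return True
-- ===== SOURCE B (Python) =====
-- def word_match_unique(word: str):
--     chars = list(word)
--     counts = [chars.count(c) for c in 'RSTLNE']
--     return max(counts) <= 1 and sum(counts) == len(word)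
-- ===== Notes on version B (the rewrite author's own statement) =====
-- stated objective: alternative
-- what changed: B iterates over the fixed six-letter alphabet instead of over the word: it tallies each allowed letter's count in the word and decides via max(counts) <= 1 (no duplicate allowed letter) and sum(counts) == len(word) (no character outside the alphabet), with no per-character scan, seen-set or early return.
import Mathlib
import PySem

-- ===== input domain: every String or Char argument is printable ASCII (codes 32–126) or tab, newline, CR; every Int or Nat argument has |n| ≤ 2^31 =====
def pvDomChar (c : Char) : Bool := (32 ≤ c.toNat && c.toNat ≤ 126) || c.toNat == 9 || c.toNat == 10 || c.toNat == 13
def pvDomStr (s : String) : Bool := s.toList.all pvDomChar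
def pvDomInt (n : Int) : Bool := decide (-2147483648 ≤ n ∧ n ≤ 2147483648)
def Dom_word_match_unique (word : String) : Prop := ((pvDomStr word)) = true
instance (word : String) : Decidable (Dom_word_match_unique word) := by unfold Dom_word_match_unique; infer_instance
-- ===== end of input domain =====

-- B iterates over the fixed six-letter alphabet tallying counts instead of scanning the word
-- with a seen-set; it decides via max/sum of the counts (alternative decomposition, same cost).

-- ===== PORT A =====
-- A's loop: for letter in word, with the seen-set as accumulator; free_letters is the local
-- 'RSTLNE'; 'letter in free_letters' on a single char is exact as membership in its char list
def wmuLoopA (freeLetters : List Char) : List Char → PySem.Set Char → Bool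
  | [], _ => true
  | c :: cs, seen =>
    if !(freeLetters.contains c) then false
    else if PySem.Set.contains seen c then false
    else wmuLoopA freeLetters cs (PySem.Set.add seen c)

def word_match_unique (word : String) : Bool :=
  wmuLoopA "RSTLNE".toList word.toList PySem.Set.empty

-- ===== PORT B =====
-- chars = list(word); counts = [chars.count(c) for c in 'RSTLNE'];
-- max(counts) <= 1 and sum(counts) == len(word). counts is always non-empty (6 entries),
-- so Python's max never raises; .getD 0 only makes the port total.
def word_match_unique_alt (word : String) : Bool :=
  let chars := word.toList
  let counts := "RSTLNE".toList.map (fun c => (PySem.List.count chars c : Int))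
  decide ((PySem.List.max? counts (fun x => x)).getD 0 ≤ 1)
    && (counts.sum == (PySem.Str.len word : Int))

-- ===== PRECONDITION & SPEC =====
def Spec_word_match_unique (word : String) (out : Bool) : Prop := out = word_match_unique_alt word
instance (word : String) (out : Bool) : Decidable (Spec_word_match_unique word out) := by unfold Spec_word_match_unique; infer_instance

-- ===== CLAIM (what is proved, stated in full; the proofs are below) =====
def Claim_equal_word_match_unique : Prop := ∀ (word : String), Dom_word_match_unique word → Spec_word_match_unique word (word_match_unique word)

-- ===== LEMMAS AND PROOFS =====

-- A's loop decided as a predicate: all letters allowed, no duplicates, none already seen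
theorem wmuLoopA_eq (rs : List Char) (l : List Char) (seen : PySem.Set Char) :
    wmuLoopA rs l seen =
      decide (l.Nodup ∧ (∀ c ∈ l, c ∈ rs) ∧ ∀ c ∈ l, c ∉ seen) := by
  induction l generalizing seen with
  | nil => simp [wmuLoopA]
  | cons c cs ih =>
    simp only [wmuLoopA]
    by_cases hR : c ∈ rs
    · by_cases hS : c ∈ seen
      · have hc : PySem.Set.contains seen c = true := (PySem.Set.contains_iff _ _).2 hS
        simp [hR, hS]
      · have hc : PySem.Set.contains seen c = false := by
          cases h : PySem.Set.contains seen c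
          · rfl
          · exact absurd ((PySem.Set.contains_iff _ _).1 h) hS
        have hrc : (!rs.contains c) = false := by simp [hR]
        simp only [hrc, Bool.false_eq_true, if_false, hc, ih]
        have hma : ∀ y : Char, y ∈ PySem.Set.add seen c ↔ y ∈ seen ∨ y = c := by
          intro y; simp [PySem.Set.mem_add]
        rw [decide_eq_decide]
        constructor
        · rintro ⟨hnd, hall, hns⟩
          have hccs : c ∉ cs := fun hcm => (hns c hcm) ((hma c).2 (Or.inr rfl))
          refine ⟨List.nodup_cons.2 ⟨hccs, hnd⟩, ?_, ?_⟩
          · intro x hx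
            rcases List.mem_cons.1 hx with rfl | hx
            · exact hR
            · exact hall x hx
          · intro x hx
            rcases List.mem_cons.1 hx with rfl | hx
            · exact hS
            · exact fun hm => hns x hx ((hma x).2 (Or.inl hm))
        · rintro ⟨hnd, hall, hns⟩
          rcases List.nodup_cons.1 hnd with ⟨hccs, hnd'⟩
          refine ⟨hnd', fun x hx => hall x (List.mem_cons_of_mem _ hx), ?_⟩
          intro x hx hm
          rcases (hma x).1 hm with h' | rfl
          · exact hns x (List.mem_cons_of_mem _ hx) h'
          · exact hccs hx
    · simp [hR]

-- counting split: with c ∉ rs, countP (· ∈ c::rs) = count c + countP (· ∈ rs)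
theorem countP_cons_alpha (l : List Char) (c : Char) (rs : List Char) (hc : c ∉ rs) :
    l.countP (fun x => decide (x ∈ c :: rs))
      = l.count c + l.countP (fun x => decide (x ∈ rs)) := by
  induction l with
  | nil => simp
  | cons x xs ih =>
    simp only [List.countP_cons, List.count_cons, ih]
    by_cases hx : x = c
    · subst hx
      have h1 : (x ∈ x :: rs) := List.mem_cons_self
      have h2 : x ∉ rs := hc
      simp [h1, h2]
      omega
    · have hxc : (x ∈ c :: rs) ↔ (x ∈ rs) := by
        simp [List.mem_cons, hx]
      by_cases hxr : x ∈ rs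
      · simp [hxc.2 hxr, hxr, hx]
        omega
      · have : x ∉ c :: rs := fun h => hxr (hxc.1 h)
        simp [this, hxr, hx]

-- sum of per-letter counts over a duplicate-free alphabet = number of chars from the alphabet
theorem sum_counts_eq_countP (l : List Char) (rs : List Char) (h : rs.Nodup) :
    (rs.map (fun c => (l.count c : Int))).sum
      = (l.countP (fun x => decide (x ∈ rs)) : Int) := by
  induction rs with
  | nil => simp
  | cons c rs ih =>
    rcases List.nodup_cons.1 h with ⟨hc, hnd⟩
    rw [List.map_cons, List.sum_cons, ih hnd, countP_cons_alpha l c rs hc]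
    push_cast
    ring

-- ===== VERDICT (by name: the statement is the Claim_ definition above) =====
theorem word_match_unique_spec : Claim_equal_word_match_unique := by
  intro word _
  unfold Spec_word_match_unique word_match_unique word_match_unique_alt
  rw [wmuLoopA_eq]
  set l := word.toList with hl
  set rs : List Char := "RSTLNE".toList with hrs
  have hndrs : rs.Nodup := by rw [hrs]; decide
  set counts := rs.map (fun c => (PySem.List.count l c : Int)) with hcounts
  have hcount_eq : (fun c => (PySem.List.count l c : Int)) = (fun c => (l.count c : Int)) := by
    funext c; simp [PySem.List.count_eq]
  -- B's max: counts is non-empty, and max ≤ 1 iff every count ≤ 1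
  obtain ⟨m, hm⟩ : ∃ m, PySem.List.max? counts (fun x => x) = some m := by
    cases h : PySem.List.max? counts (fun x => x) with
    | some m => exact ⟨m, rfl⟩
    | none =>
      have : counts = [] := (PySem.List.max?_eq_none_iff _ _).1 h
      simp [hcounts, hrs] at this
  have hmmem : m ∈ counts := PySem.List.max?_mem hm
  have hmmax : ∀ y ∈ counts, y ≤ m := fun y hy => PySem.List.max?_isMax hm y hy
  have hmaxiff : ((PySem.List.max? counts (fun x => x)).getD 0 ≤ 1)
      ↔ (∀ c ∈ rs, (l.count c : Int) ≤ 1) := by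
    rw [hm]
    constructor
    · intro h1 c hc
      refine le_trans (hmmax _ ?_) h1
      rw [hcounts, hcount_eq]
      exact List.mem_map.2 ⟨c, hc, rfl⟩
    · intro hall
      rw [hcounts, hcount_eq] at hmmem
      rcases List.mem_map.1 hmmem with ⟨c, hc, hmc⟩
      simp only [Option.getD_some]
      rw [← hmc]
      exact hall c hc
  have hsum : counts.sum = ((l.countP (fun x => decide (x ∈ rs))) : Int) := by
    rw [hcounts, hcount_eq]
    exact sum_counts_eq_countP l rs hndrs
  rw [Bool.eq_iff_iff]
  simp only [decide_eq_true_eq, Bool.and_eq_true, beq_iff_eq]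
  rw [hsum, hmaxiff]
  have hlen : (PySem.Str.len word : Int) = (l.length : Int) := by
    simp [hl]
  rw [hlen]
  constructor
  · rintro ⟨hnd, hall, -⟩
    refine ⟨?_, ?_⟩
    · intro c hc
      exact_mod_cast (List.nodup_iff_count_le_one.1 hnd) c
    · have : l.countP (fun x => decide (x ∈ rs)) = l.length :=
        (List.countP_eq_length).2 fun c hc => by simp [hall c hc]
      exact_mod_cast this
  · rintro ⟨hcnt, hcp⟩
    have hcpN : l.countP (fun x => decide (x ∈ rs)) = l.length := by exact_mod_cast hcp
    have hall : ∀ c ∈ l, c ∈ rs := by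
      intro c hc
      have := (List.countP_eq_length (p := fun x => decide (x ∈ rs))).1 hcpN c hc
      simpa using this
    refine ⟨?_, hall, by simp [PySem.Set.empty]⟩
    rw [List.nodup_iff_count_le_one]
    intro c
    by_cases hcl : c ∈ l
    · exact_mod_cast hcnt c (hall c hcl)
    · simp [List.count_eq_zero_of_not_mem hcl]
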